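-- pv_equiv track=rewrite | github.com/adlynasn/MurderMansion | .idea/MAIN/part4.py | find_book_title
-- ===== SOURCE A (Python) =====
-- def find_book_title(books, target_word):
--     book_dict = {}
--
--     # Create a hash table/dictionary with book titles as keys
--     for title in books:
--         words = title.split()
--         for word in words:
--             if word.lower() not in book_dict:
--                 book_dict[word.lower()] = [title]
--             else:
--                 book_dict[word.lower()].append(title)
--
--     # Look up the target word in the hash table
--     if target_word.lower() in book_dict:
--         return book_dict[target_word.lower()]
--     else:
--         return []
-- ===== SOURCE B (Python) =====
-- def find_book_title(books, target_word):
--     target = target_word.lower()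
--     result = []
--     for title in books:
--         for word in title.split():
--             if word.lower() == target:
--                 result.append(title)
--     return result
-- ===== Notes on version B (the rewrite author's own statement) =====
-- stated objective: simpler
-- what changed: Replaces the build-inverted-index-dict-then-lookup strategy with a single direct scan that appends the title once per matching word occurrence, removing the dictionary entirely.
import Mathlib
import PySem

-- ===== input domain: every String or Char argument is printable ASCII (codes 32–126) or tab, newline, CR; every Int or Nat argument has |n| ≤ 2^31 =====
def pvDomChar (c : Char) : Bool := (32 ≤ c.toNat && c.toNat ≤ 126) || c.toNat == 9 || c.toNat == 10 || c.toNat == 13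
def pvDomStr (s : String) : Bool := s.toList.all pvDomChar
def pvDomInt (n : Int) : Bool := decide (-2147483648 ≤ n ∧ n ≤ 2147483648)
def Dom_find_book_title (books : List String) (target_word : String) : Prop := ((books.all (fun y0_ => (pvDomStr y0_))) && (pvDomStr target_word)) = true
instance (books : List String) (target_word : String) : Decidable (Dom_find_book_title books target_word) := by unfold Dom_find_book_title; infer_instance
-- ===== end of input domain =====

-- B drops A's inverted-index dictionary and does one direct scan, appending the title once per matching word occurrence (simpler).

-- ===== PORT A =====
def find_book_title (books : List String) (target_word : String) : List String :=
  let book_dict : PySem.Dict String (List String) :=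
    books.foldl (fun d title =>
      (PySem.Str.split₀ title).foldl (fun d word =>
        let k := PySem.Str.lower word
        if !d.contains k then d.insert k [title]
        else d.insert k (d.getD k [] ++ [title])) d) PySem.Dict.empty
  let k := PySem.Str.lower target_word
  if book_dict.contains k then book_dict.getD k [] else []

-- ===== PORT B =====
def find_book_title_alt (books : List String) (target_word : String) : List String :=
  let target := PySem.Str.lower target_word
  books.foldl (fun result title =>
    (PySem.Str.split₀ title).foldl (fun result word =>
      if PySem.Str.lower word == target then result ++ [title] else result) result) []

-- ===== PRECONDITION & SPEC =====
def Spec_find_book_title (books : List String) (target_word : String) (out : List String) : Prop := out = find_book_title_alt books target_word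
instance (books : List String) (target_word : String) (out : List String) : Decidable (Spec_find_book_title books target_word out) := by unfold Spec_find_book_title; infer_instance

-- ===== CLAIM (what is proved, stated in full; the proofs are below) =====
def Claim_equal_find_book_title : Prop := ∀ (books : List String) (target_word : String), Dom_find_book_title books target_word → Spec_find_book_title books target_word (find_book_title books target_word)

-- ===== LEMMAS AND PROOFS =====

-- A's dict-update step (insert-fresh / append) is exactly `modify k [] (· ++ [title])`.
theorem pv_step_eq_modify (d : PySem.Dict String (List String)) (k : String) (title : String) :
    (if !d.contains k then d.insert k [title] else d.insert k (d.getD k [] ++ [title]))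
      = d.modify k [] (· ++ [title]) := by
  by_cases h : d.contains k = true
  · simp [h, PySem.Dict.modify, PySem.Dict.getD_eq_get?_getD]
  · simp at h
    simp [h, PySem.Dict.modify, PySem.Dict.getD_of_not_contains _ _ h]

-- lookup after the inner word loop: old value ++ one copy of `title` per matching word
theorem pv_inner (words : List String) (d : PySem.Dict String (List String))
    (title k : String) :
    ((words.foldl (fun d word => d.modify (PySem.Str.lower word) [] (· ++ [title])) d).getD k [])
      = d.getD k [] ++ (words.filter (fun w => PySem.Str.lower w == k)).map (fun _ => title) := by
  induction words generalizing d with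
  | nil => simp
  | cons w ws ih =>
    simp only [List.foldl_cons, List.filter_cons, ih]
    by_cases h : PySem.Str.lower w == k
    · have hk : k = PySem.Str.lower w := (eq_of_beq h).symm
      simp [hk, PySem.Dict.getD_modify_self]
    · have hk : k ≠ PySem.Str.lower w := fun he => by simp [he] at h
      simp [h, PySem.Dict.getD_modify_of_ne d ([]:List String) (· ++ [title]) hk]

-- lookup after the whole dict-building loop
theorem pv_outer (books : List String) (d : PySem.Dict String (List String)) (k : String) :
    ((books.foldl (fun d title =>
        (PySem.Str.split₀ title).foldl (fun d word => d.modify (PySem.Str.lower word) [] (· ++ [title])) d) d).getD k [])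
      = d.getD k [] ++ books.flatMap (fun t =>
          ((PySem.Str.split₀ t).filter (fun w => PySem.Str.lower w == k)).map (fun _ => t)) := by
  induction books generalizing d with
  | nil => simp
  | cons b bs ih => simp [ih, pv_inner]

-- B's inner word loop, characterised
theorem pv_alt_inner (ws : List String) (acc : List String) (target b : String) :
    (ws.foldl (fun result word =>
        if PySem.Str.lower word == target then result ++ [b] else result) acc)
      = acc ++ (ws.filter (fun w => PySem.Str.lower w == target)).map (fun _ => b) := by
  induction ws generalizing acc with
  | nil => simp
  | cons w ws ihw =>
    simp only [List.foldl_cons, List.filter_cons, ihw]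
    by_cases h : PySem.Str.lower w == target <;> simp [h]

-- B's accumulator fold, characterised
theorem pv_alt (books : List String) (acc : List String) (target : String) :
    (books.foldl (fun result title =>
        (PySem.Str.split₀ title).foldl (fun result word =>
          if PySem.Str.lower word == target then result ++ [title] else result) result) acc)
      = acc ++ books.flatMap (fun t =>
          ((PySem.Str.split₀ t).filter (fun w => PySem.Str.lower w == target)).map (fun _ => t)) := by
  induction books generalizing acc with
  | nil => simp
  | cons b bs ih =>
    simp only [List.foldl_cons, ih, List.flatMap_cons, ← List.append_assoc]
    congr 1
    exact pv_alt_inner (PySem.Str.split₀ b) acc target b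

-- ===== VERDICT (by name: the statement is the Claim_ definition above) =====
theorem find_book_title_spec : Claim_equal_find_book_title := by
  intro books target_word _
  unfold Spec_find_book_title find_book_title find_book_title_alt
  have hstep : (fun (d : PySem.Dict String (List String)) title =>
      (PySem.Str.split₀ title).foldl (fun d word =>
        let k := PySem.Str.lower word
        if !d.contains k then d.insert k [title]
        else d.insert k (d.getD k [] ++ [title])) d)
    = (fun d title => (PySem.Str.split₀ title).foldl
        (fun d word => d.modify (PySem.Str.lower word) [] (· ++ [title])) d) := by
    funext d title
    congr 1
    funext d word
    exact pv_step_eq_modify d (PySem.Str.lower word) title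
  rw [hstep]
  set k := PySem.Str.lower target_word
  have hget := pv_outer books PySem.Dict.empty k
  by_cases hc : (books.foldl (fun d title =>
      (PySem.Str.split₀ title).foldl (fun d word => d.modify (PySem.Str.lower word) [] (· ++ [title])) d)
      PySem.Dict.empty).contains k = true
  · simp only [hc, if_true, hget, PySem.Dict.getD_empty, List.nil_append, pv_alt, k]
  · simp only [Bool.not_eq_true] at hc
    have h0 : (books.foldl (fun d title =>
        (PySem.Str.split₀ title).foldl (fun d word => d.modify (PySem.Str.lower word) [] (· ++ [title])) d)
        PySem.Dict.empty).getD k ([] : List String) = [] := PySem.Dict.getD_of_not_contains _ _ hc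
    rw [hget, PySem.Dict.getD_empty, List.nil_append] at h0
    rw [if_neg (by simp [hc])]
    simp only [pv_alt, List.nil_append]
    exact h0.symm
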